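-- pv_equiv track=rewrite | github.com/dannyray44/utils | base_chager.py | _generate_compliant_symbols_list
-- ===== SOURCE A (Python) =====
-- from typing import Tuple, Union, List
-- from string import digits, ascii_letters
--
-- DEFAULT_SYMBOLS = digits + ascii_letters
--
-- def _generate_compliant_symbols_list(symbols: Union[str, List[str]],
--         base: int) -> Tuple[List[str], int]:
--     "Build a symbols list compatible with the base"
--     power: int = 1
--     new_symbols: List[str] = []
--
--     symbol_count = len(symbols)
--
--     if symbol_count >= base:
--         return list(symbols), 1
--
--     while base > symbol_count**power:
--         power += 1
--
--     for i in range(base):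
--         new_symbols.append(''.join(_int_to_alt_base_str_list(i, symbol_count, symbols, power)))
--
--     return new_symbols, power
--
-- def _int_to_alt_base_str_list(value: int, base: int,
--         symbols: Union[str, List[str]]= DEFAULT_SYMBOLS, min_length: int = 1) -> List[str]:
--     """
--     Converts an integer to an alternate base using symbols as the key for which symbol
--     represents which numbers.
--     """
--     symbols, _ = _generate_compliant_symbols_list(symbols, base)
--     return [symbols[i] for i in _int_to_alt_base_int_list(value, base, min_length)]
--
-- def _int_to_alt_base_int_list(value: int, base: int, min_length: int= 1) -> List[int]:
--     """
--     Converts an integer into a alternate base. Each character in the new number is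
--     stored as an integer value in an array.
--     """
--     nums: List[int] = []
--     while len(nums) < min_length or value != 0:
--         value, remainder = divmod(value, base)
--         nums.insert(0, remainder)
--     return nums
-- ===== SOURCE B (Python) =====
-- def _generate_compliant_symbols_list(symbols, base):
--     "Build a symbols list compatible with the base"
--     symbol_count = len(symbols)
--     if symbol_count >= base:
--         return list(symbols), 1
--     power = 1
--     while base > symbol_count ** power:
--         power += 1
--     # enumerate all length-`power` tuples of symbols in lexicographic order
--     # (rightmost position varies fastest), then keep the first `base` of them
--     combos = [()]
--     for _ in range(power):
--         combos = [prev + (sym,) for prev in combos for sym in symbols]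
--     return [''.join(c) for c in combos[:base]], power
-- ===== Notes on version B (the rewrite author's own statement) =====
-- stated objective: alternative
-- what changed: Replaces the per-value divmod digit-conversion loop (with its recursive re-compliance call per element) by a repeated cartesian extension that enumerates all length-power symbol tuples in lexicographic order and truncates to the first base of them.
import Mathlib
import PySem

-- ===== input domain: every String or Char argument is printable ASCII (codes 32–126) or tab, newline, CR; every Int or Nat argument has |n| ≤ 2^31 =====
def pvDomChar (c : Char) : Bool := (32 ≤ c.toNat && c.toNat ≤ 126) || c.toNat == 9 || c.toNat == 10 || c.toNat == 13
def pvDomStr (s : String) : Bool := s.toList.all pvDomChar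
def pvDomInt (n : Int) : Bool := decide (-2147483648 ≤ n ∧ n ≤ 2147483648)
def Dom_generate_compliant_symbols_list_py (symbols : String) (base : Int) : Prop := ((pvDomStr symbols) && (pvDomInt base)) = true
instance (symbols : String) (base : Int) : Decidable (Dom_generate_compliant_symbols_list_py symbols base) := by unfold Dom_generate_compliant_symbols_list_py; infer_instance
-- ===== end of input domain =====

-- B replaces A's per-value divmod digit-conversion loop by a repeated cartesian extension of
-- symbol tuples, truncated to the first `base`; objective: alternative (same result, different algorithm).

-- ===== PORT A =====

-- list(symbols) for a str: the list of its one-character strings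
def pyListOfStr (s : String) : List String := s.toList.map (fun c => String.ofList [c])

-- 'power = 1; while base > symbol_count ** power: power += 1' (fuel only makes the loop total;
-- inside Pre_ the loop terminates well within the supplied fuel)
def findPowA (n base : Int) : Nat → Int → Int
  | 0, p => p
  | f+1, p => if base > n ^ p.toNat then findPowA n base f (p+1) else p

-- _int_to_alt_base_int_list: 'while len(nums) < min_length or value != 0: value, r = divmod(value, base); nums.insert(0, r)'
def intListA : Nat → Int → Int → Int → List Int → List Int
  | 0, _, _, _, nums => nums
  | f+1, v, b, m, nums =>
    if (nums.length : Int) < m ∨ v ≠ 0 then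
      intListA f (PySem.Int.floordiv v b) b m (PySem.Int.mod v b :: nums)
    else nums

-- _generate_compliant_symbols_list; the fuel bounds the mutual recursion through
-- _int_to_alt_base_str_list (whose nested call always takes the early return, so fuel 2 suffices)
def genA : Nat → String → Int → List String × Int
  | 0, s, _ => (pyListOfStr s, 1)
  | f+1, s, base =>
    let n : Int := (s.toList.length : Int)
    if n ≥ base then (pyListOfStr s, 1)
    else
      let power := findPowA n base (base.toNat + 1) 1
      (((PySem.List.pyRange 0 base 1).map (fun i =>
          -- _int_to_alt_base_str_list(i, n, s, power), its own call to _generate… inlined via genA f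
          let syms := (genA f s n).1
          PySem.Str.join "" ((intListA (power.toNat + i.toNat + 1) i n power []).map
            (fun d => (PySem.List.pyGet? syms d).getD "")))), power)

def generate_compliant_symbols_list_py (symbols : String) (base : Int) : List String × Int :=
  genA 2 symbols base

-- ===== PORT B =====

-- combos = [prev + (sym,) for prev in combos for sym in symbols]
def extendB (S : List String) (acc : List (List String)) : List (List String) :=
  acc.flatMap (fun prev => S.map (fun sym => prev ++ [sym]))

-- 'combos = [()]; for _ in range(power): combos = …'
def repeatB (S : List String) : Nat → List (List String)
  | 0 => [[]]
  | k+1 => extendB S (repeatB S k)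

-- the same while loop as in A (Source B keeps it verbatim)
def findPowB (n base : Int) : Nat → Int → Int
  | 0, p => p
  | f+1, p => if base > n ^ p.toNat then findPowB n base f (p+1) else p

def generate_compliant_symbols_list_py_alt (symbols : String) (base : Int) : List String × Int :=
  let S := pyListOfStr symbols
  let n : Int := (symbols.toList.length : Int)
  if n ≥ base then (S, 1)
  else
    let power := findPowB n base (base.toNat + 1) 1
    ((PySem.List.slice (repeatB S power.toNat) none (some base)).map (PySem.Str.join ""), power)

-- ===== PRECONDITION & SPEC =====
-- Pre_ excludes exactly the inputs on which A never returns: with 0 or 1 symbols and base above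
-- the symbol count, 'while base > symbol_count ** power' loops forever.
def Pre_generate_compliant_symbols_list_py (symbols : String) (base : Int) : Prop :=
  base ≤ (symbols.toList.length : Int) ∨ 2 ≤ symbols.toList.length
instance (symbols : String) (base : Int) : Decidable (Pre_generate_compliant_symbols_list_py symbols base) := by unfold Pre_generate_compliant_symbols_list_py; infer_instance

def pvWitness_generate_compliant_symbols_list_py : String × Int := ("ab", 5)

def Spec_generate_compliant_symbols_list_py (symbols : String) (base : Int) (out : List String × Int) : Prop := out = generate_compliant_symbols_list_py_alt symbols base
instance (symbols : String) (base : Int) (out : List String × Int) : Decidable (Spec_generate_compliant_symbols_list_py symbols base out) := by unfold Spec_generate_compliant_symbols_list_py; infer_instance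

-- ===== CLAIM (what is proved, stated in full; the proofs are below) =====
def Claim_equal_generate_compliant_symbols_list_py : Prop := ∀ (symbols : String) (base : Int), Dom_generate_compliant_symbols_list_py symbols base → Pre_generate_compliant_symbols_list_py symbols base → Spec_generate_compliant_symbols_list_py symbols base (generate_compliant_symbols_list_py symbols base)

-- ===== LEMMAS AND PROOFS =====

-- most-significant-first digit list of v in base n, exactly width p
def modelD (n : Int) : Nat → Int → List Int
  | 0, _ => []
  | p+1, v => modelD n p (PySem.Int.floordiv v n) ++ [PySem.Int.mod v n]

-- the two copies of the power-search loop agree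
theorem findPowB_eq_findPowA (n base : Int) : ∀ (f : Nat) (p : Int),
    findPowB n base f p = findPowA n base f p := by
  intro f
  induction f with
  | zero => intro p; rfl
  | succ f ih => intro p; simp [findPowA, findPowB, ih]

-- the power search returns some power with base ≤ n ^ power, given enough fuel
theorem findPowA_spec (n base : Int) : ∀ (f : Nat) (p : Int), 1 ≤ p →
    base ≤ n ^ (p.toNat + f) →
    1 ≤ findPowA n base f p ∧ base ≤ n ^ (findPowA n base f p).toNat := by
  intro f
  induction f with
  | zero => intro p hp h; exact ⟨hp, by simpa using h⟩
  | succ f ih =>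
    intro p hp h
    by_cases hgt : base > n ^ p.toNat
    · simp only [findPowA, if_pos hgt]
      refine ih (p+1) (by omega) ?_
      have : (p+1).toNat + f = p.toNat + (f+1) := by omega
      rw [this]; exact h
    · simp only [findPowA, if_neg hgt]
      exact ⟨hp, not_lt.mp hgt⟩

-- intListA computes the width-p msd-first digits
theorem intListA_eq_modelD (n : Int) (hn : 2 ≤ n) :
    ∀ (p : Nat) (fuel : Nat) (v : Int) (nums : List Int), p ≤ fuel → 0 ≤ v → v < n ^ p →
    intListA fuel v n ((nums.length : Int) + p) nums = modelD n p v ++ nums := by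
  intro p
  induction p with
  | zero =>
    intro fuel v nums _ hv0 hvlt
    have hv : v = 0 := by simp at hvlt; omega
    subst hv
    cases fuel with
    | zero => simp [intListA, modelD]
    | succ f => simp [intListA, modelD]
  | succ p ih =>
    intro fuel v nums hf hv0 hvlt
    cases fuel with
    | zero => omega
    | succ f =>
      have hcond : ((nums.length : Int) < (nums.length : Int) + ((p+1 : Nat) : Int) ∨ v ≠ 0) := by left; push_cast; omega
      rw [intListA, if_pos hcond]
      have hdiv0 : 0 ≤ PySem.Int.floordiv v n := by
        rw [PySem.Int.floordiv_eq_ediv_of_pos (by omega)]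
        exact Int.ediv_nonneg hv0 (by omega)
      have hdivlt : PySem.Int.floordiv v n < n ^ p := by
        rw [PySem.Int.floordiv_lt_iff_lt_mul (by omega)]
        calc v < n ^ (p+1) := hvlt
        _ = n ^ p * n := by ring
      have hlen : (nums.length : Int) + ((p+1 : Nat) : Int) = (((PySem.Int.mod v n :: nums).length : Int)) + (p : Int) := by
        simp only [List.length_cons]; push_cast; omega
      rw [hlen, ih f (PySem.Int.floordiv v n) (PySem.Int.mod v n :: nums) (by omega) hdiv0 hdivlt]
      simp [modelD]

-- mapping over S is mapping its indices
theorem map_eq_range_pyGet (S : List String) {α : Type} (g : String → α) :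
    S.map g = (List.range S.length).map
      (fun (r : Nat) => g ((PySem.List.pyGet? S (r : Int)).getD "")) := by
  apply List.ext_getElem
  · simp
  · intro k h1 h2
    rw [List.getElem_map, List.getElem_map, List.getElem_range]
    have h1' : k < S.length := by simpa using h1
    rw [PySem.List.pyGet?_natCast]
    simp [h1']


theorem range_mul_flatMap (a b : Nat) :
    List.range (a * b) = (List.range a).flatMap (fun q => (List.range b).map (fun r => q * b + r)) := by
  induction a with
  | zero => simp
  | succ a ih =>
    rw [Nat.succ_mul, List.range_add, ih, List.range_succ, List.flatMap_append]
    simp [Nat.add_comm]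


-- the cartesian extension enumerates exactly the width-p encodings of 0 .. n^p - 1
theorem repeatB_eq (S : List String) :
    ∀ p : Nat, repeatB S p = (List.range (S.length ^ p)).map
      (fun (v : Nat) => (modelD (S.length : Int) p (v : Int)).map
        (fun d => (PySem.List.pyGet? S d).getD "")) := by
  intro p
  induction p with
  | zero => simp [repeatB, modelD]
  | succ p ih =>
    have inner : ∀ q : Nat,
        S.map (fun sym => ((modelD (S.length : Int) p (q : Int)).map
            (fun d => (PySem.List.pyGet? S d).getD "")) ++ [sym]) =
        (List.range S.length).map (fun (r : Nat) =>
          (modelD (S.length : Int) (p+1) ((q * S.length + r : Nat) : Int)).map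
            (fun d => (PySem.List.pyGet? S d).getD "")) := by
      intro q
      rw [map_eq_range_pyGet S (fun sym => ((modelD (S.length : Int) p (q : Int)).map
            (fun d => (PySem.List.pyGet? S d).getD "")) ++ [sym])]
      apply List.map_congr_left
      intro r hr
      have hrN : r < S.length := List.mem_range.mp hr
      have hdiv : PySem.Int.floordiv ((q * S.length + r : Nat) : Int) (S.length : Int) = (q : Int) := by
        rw [PySem.Int.floordiv_natCast]
        congr 1
        rw [Nat.mul_comm q S.length, Nat.mul_add_div (by omega), Nat.div_eq_of_lt hrN]
        omega
      have hmod : PySem.Int.mod ((q * S.length + r : Nat) : Int) (S.length : Int) = (r : Int) := by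
        rw [PySem.Int.mod_natCast]
        congr 1
        rw [Nat.mul_comm q S.length, Nat.mul_add_mod, Nat.mod_eq_of_lt hrN]
      simp only [modelD]
      rw [List.map_append, hdiv, hmod]
      simp
    rw [repeatB, extendB, ih]
    rw [List.flatMap_map]
    rw [pow_succ, range_mul_flatMap, List.map_flatMap]
    simp only [Function.comp_def, List.map_map, inner]

theorem generate_compliant_symbols_list_py_spec : Claim_equal_generate_compliant_symbols_list_py := by
  intro symbols base _ hpre
  unfold Spec_generate_compliant_symbols_list_py
  unfold generate_compliant_symbols_list_py generate_compliant_symbols_list_py_alt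
  simp only [genA]
  by_cases hge : (symbols.toList.length : Int) ≥ base
  · simp only [if_pos hge]
  · simp only [if_neg hge, ge_iff_le, le_refl, if_true]
    rw [findPowB_eq_findPowA]
    have hN2 : 2 ≤ symbols.toList.length := by
      rcases hpre with h | h
      · exact absurd h hge
      · exact h
    have hn2 : (2 : Int) ≤ (symbols.toList.length : Int) := by exact_mod_cast hN2
    have hbase3 : (3 : Int) ≤ base := by omega
    have hfuel : base ≤ (symbols.toList.length : Int) ^ ((1 : Int).toNat + (base.toNat + 1)) := by
      have h1 : base ≤ (2 : Int) ^ base.toNat := by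
        have hlt := Nat.lt_two_pow_self (n := base.toNat)
        have h2 : ((base.toNat : Nat) : Int) = base := by omega
        calc base = ((base.toNat : Nat) : Int) := h2.symm
          _ ≤ ((2 ^ base.toNat : Nat) : Int) := by exact_mod_cast hlt.le
          _ = (2 : Int) ^ base.toNat := by push_cast; ring
      calc base ≤ (2 : Int) ^ base.toNat := h1
        _ ≤ (symbols.toList.length : Int) ^ base.toNat := pow_le_pow_left₀ (by norm_num) hn2 _
        _ ≤ (symbols.toList.length : Int) ^ ((1 : Int).toNat + (base.toNat + 1)) := by
            apply pow_le_pow_right₀ (by omega)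
            omega
    obtain ⟨hp1, hple⟩ :=
      findPowA_spec (symbols.toList.length : Int) base (base.toNat + 1) 1 le_rfl hfuel
    generalize hqdef : findPowA (symbols.toList.length : Int) base (base.toNat + 1) 1 = q at *
    obtain ⟨p, rfl⟩ : ∃ p : Nat, q = (p : Int) := ⟨q.toNat, by omega⟩
    simp only [Int.toNat_natCast] at *
    refine Prod.ext ?_ rfl
    rw [PySem.List.pyRange_one, PySem.List.slice_to (repeatB (pyListOfStr symbols) p) (by omega : (0 : Int) ≤ base)]
    rw [repeatB_eq]
    have hSlen : (pyListOfStr symbols).length = symbols.toList.length := by simp [pyListOfStr]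
    rw [hSlen]
    have hNp : base.toNat ≤ symbols.toList.length ^ p := by
      have hcast : ((symbols.toList.length ^ p : Nat) : Int) = (symbols.toList.length : Int) ^ p := by
        push_cast; ring
      omega
    rw [← List.map_take, List.take_range, Nat.min_eq_left hNp]
    rw [List.map_map, List.map_map]
    dsimp only
    simp only [sub_zero]
    apply List.map_congr_left
    intro k hk
    have hkb : k < base.toNat := List.mem_range.mp hk
    have hklt : ((k : Nat) : Int) < (symbols.toList.length : Int) ^ p := by
      have hkb' : ((k : Nat) : Int) < base := by omega
      exact lt_of_lt_of_le hkb' hple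
    have hmod := intListA_eq_modelD (symbols.toList.length : Int) hn2 p (p + k + 1) ((k : Nat) : Int) []
      (by omega) (Int.natCast_nonneg k) hklt
    simp only [List.length_nil, Nat.cast_zero, zero_add, List.append_nil] at hmod
    simp only [Function.comp_def, zero_add, Int.toNat_natCast]
    rw [hmod]
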